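-- pv_equiv track=rewrite | github.com/coder-baymax/taxi-poc-aws | poc-backend/dashboard/views_history.py | sort_by_key
-- ===== SOURCE A (Python) =====
-- def sort_by_key(value_list):
--     na_item = []
--     min_item = []
--     other_item = []
--     for item in value_list:
--         if item["key"] == "NA":
--             na_item.append(item)
--         elif isinstance(item["key"], str) and item["key"].startswith("<"):
--             min_item.append(item)
--         else:
--             other_item.append(item)
--     return [*na_item, *min_item, *sorted(other_item, key=lambda x: x["key"])]
-- ===== SOURCE B (Python) =====
-- def sort_by_key(value_list):
--     def rank(item):
--         key = item["key"]
--         if key == "NA":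
--             return 0
--         if isinstance(key, str) and key.startswith("<"):
--             return 1
--         return 2
--     return sorted(value_list, key=lambda x: (rank(x), x["key"] if rank(x) == 2 else ""))
-- ===== Notes on version B (the rewrite author's own statement) =====
-- stated objective: idiomatic
-- what changed: Replaced the three-bucket partition-then-sort with a single stable sorted() call over a composite (rank, key) key, where rank places 'NA' items first, '<'-prefixed keys second, and the real key is compared only among rank-2 items.
import Mathlib
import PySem

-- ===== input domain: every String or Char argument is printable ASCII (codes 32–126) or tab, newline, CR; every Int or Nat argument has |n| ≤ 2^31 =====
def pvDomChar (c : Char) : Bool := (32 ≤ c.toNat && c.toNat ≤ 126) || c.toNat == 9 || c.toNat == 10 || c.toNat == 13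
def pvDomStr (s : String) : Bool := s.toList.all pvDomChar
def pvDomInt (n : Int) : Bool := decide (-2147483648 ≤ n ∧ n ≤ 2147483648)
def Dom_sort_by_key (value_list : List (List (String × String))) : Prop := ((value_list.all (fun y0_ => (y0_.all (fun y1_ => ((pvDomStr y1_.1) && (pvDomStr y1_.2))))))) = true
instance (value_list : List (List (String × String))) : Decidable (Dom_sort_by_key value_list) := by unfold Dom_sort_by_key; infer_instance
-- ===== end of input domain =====

-- B replaces A's three-bucket partition + sort of the last bucket by ONE stable sort
-- under a composite (rank, key) key; same return value, same asymptotic cost (idiomatic).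

-- ===== PORT A =====
-- item["key"]: first-match association-list lookup; Pre_ guarantees the key is present,
-- so the "" default is never read on admitted inputs.
def pvKeyOf (item : List (String × String)) : String :=
  (PySem.Dict.get? (PySem.Dict.mk item) "key").getD ""

-- Python string comparison is lexicographic on code points = List Char lex order (exact
-- on the ASCII domain); the sort key goes through .toList for that reason.
def sort_by_key (value_list : List (List (String × String))) : List (List (String × String)) :=
  let acc := value_list.foldl
    (fun (acc : List (List (String × String)) × List (List (String × String)) × List (List (String × String))) item =>
      if pvKeyOf item == "NA" then (acc.1 ++ [item], acc.2.1, acc.2.2)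
      -- isinstance(item["key"], str) is always true on the typed domain (values are str)
      else if PySem.Str.startswith (pvKeyOf item) "<" then (acc.1, acc.2.1 ++ [item], acc.2.2)
      else (acc.1, acc.2.1, acc.2.2 ++ [item]))
    ([], [], [])
  acc.1 ++ acc.2.1 ++ PySem.List.sorted acc.2.2 (fun x => (pvKeyOf x).toList)

-- ===== PORT B =====
def pvRank (item : List (String × String)) : Int :=
  if pvKeyOf item == "NA" then 0
  else if PySem.Str.startswith (pvKeyOf item) "<" then 1
  else 2

def pvSec (item : List (String × String)) : List Char :=
  if pvRank item == 2 then (pvKeyOf item).toList else []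

def sort_by_key_alt (value_list : List (List (String × String))) : List (List (String × String)) :=
  PySem.List.sorted2 value_list pvRank pvSec

-- ===== PRECONDITION & SPEC =====
-- Pre_ excludes exactly the items with no "key" entry, on which Python A raises KeyError.
def Pre_sort_by_key (value_list : List (List (String × String))) : Prop :=
  (value_list.all (fun item => (PySem.Dict.get? (PySem.Dict.mk item) "key").isSome)) = true
instance (value_list : List (List (String × String))) : Decidable (Pre_sort_by_key value_list) := by unfold Pre_sort_by_key; infer_instance
def pvWitness_sort_by_key : (List (List (String × String))) :=
  [[("key", "NA")], [("key", "b")], [("key", "<1")], [("key", "a")]]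

def Spec_sort_by_key (value_list : List (List (String × String))) (out : List (List (String × String))) : Prop := out = sort_by_key_alt value_list
instance (value_list : List (List (String × String))) (out : List (List (String × String))) : Decidable (Spec_sort_by_key value_list out) := by unfold Spec_sort_by_key; infer_instance

-- ===== CLAIM (what is proved, stated in full; the proofs are below) =====
def Claim_equal_sort_by_key : Prop := ∀ (value_list : List (List (String × String))), Dom_sort_by_key value_list → Pre_sort_by_key value_list → Spec_sort_by_key value_list (sort_by_key value_list)

-- ===== LEMMAS AND PROOFS =====

-- the rank-i bucket, in input order
def pvF (i : Int) (xs : List (List (String × String))) : List (List (String × String)) :=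
  xs.filter (fun it => pvRank it == i)

theorem pvRank_mem_F {i : Int} {xs : List (List (String × String))}
    {y : List (String × String)} (h : y ∈ pvF i xs) : pvRank y = i := by
  have := (List.mem_filter.mp h).2
  simpa using this

theorem pvMem_sorted_F2 {xs : List (List (String × String))} {y : List (String × String)}
    (hy : y ∈ PySem.List.sorted (pvF 2 xs) (fun x => (pvKeyOf x).toList)) : pvRank y = 2 :=
  pvRank_mem_F ((PySem.List.mem_sorted _ _ _ _).mp hy)

theorem insertBy_append_of_not_before {α : Type} (b : α → α → Bool) (x : α)
    (as bs : List α) (h : ∀ y ∈ as, b x y = false) :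
    PySem.List.insertBy b x (as ++ bs) = as ++ PySem.List.insertBy b x bs := by
  induction as with
  | nil => simp
  | cons a as ih =>
    have ha : b x a = false := h a (by simp)
    simp [PySem.List.insertBy, ha, ih (fun y hy => h y (by simp [hy]))]

theorem insertBy_front_of_before {α : Type} (b : α → α → Bool) (x : α)
    (bs : List α) (h : ∀ y ∈ bs, b x y = true) :
    PySem.List.insertBy b x bs = x :: bs := by
  cases bs with
  | nil => rfl
  | cons y ys => simp [PySem.List.insertBy, h y (by simp)]

theorem insertBy_congr {α : Type} (b b' : α → α → Bool) (x : α) (ys : List α)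
    (h : ∀ y ∈ ys, b x y = b' x y) :
    PySem.List.insertBy b x ys = PySem.List.insertBy b' x ys := by
  induction ys with
  | nil => rfl
  | cons y ys ih =>
    have hy := h y (by simp)
    by_cases hb : b x y = true
    · simp [PySem.List.insertBy, hb, hy ▸ hb]
    · have hb' : b x y = false := by simpa using hb
      simp [PySem.List.insertBy, hb', hy ▸ hb', ih (fun z hz => h z (by simp [hz]))]

theorem pvRank_cases (it : List (String × String)) :
    pvRank it = 0 ∨ pvRank it = 1 ∨ pvRank it = 2 := by
  unfold pvRank; split_ifs <;> simp

-- A's partition loop computes the three rank buckets (appended to the running accumulators)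
theorem pvFoldA (xs : List (List (String × String)))
    (a b c : List (List (String × String))) :
    xs.foldl
      (fun (acc : List (List (String × String)) × List (List (String × String)) × List (List (String × String))) item =>
        if pvKeyOf item == "NA" then (acc.1 ++ [item], acc.2.1, acc.2.2)
        else if PySem.Str.startswith (pvKeyOf item) "<" then (acc.1, acc.2.1 ++ [item], acc.2.2)
        else (acc.1, acc.2.1, acc.2.2 ++ [item]))
      (a, b, c)
      = (a ++ pvF 0 xs, b ++ pvF 1 xs, c ++ pvF 2 xs) := by
  induction xs generalizing a b c with
  | nil => simp [pvF]
  | cons x xs ih =>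
    rw [List.foldl_cons]
    by_cases h0 : (pvKeyOf x == "NA") = true
    · have hr : pvRank x = 0 := by simp [pvRank, h0]
      rw [if_pos h0, ih]
      simp [pvF, hr]
    · rw [if_neg h0]
      by_cases h1 : PySem.Str.startswith (pvKeyOf x) "<" = true
      · have hr : pvRank x = 1 := by unfold pvRank; rw [if_neg h0, if_pos h1]
        rw [if_pos h1, ih]
        simp [pvF, hr]
      · have hr : pvRank x = 2 := by unfold pvRank; rw [if_neg h0, if_neg h1]
        rw [if_neg h1, ih]
        simp [pvF, hr]

-- the comparator sorted2 uses (reverse = false)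
def pvBefore (a b : List (String × String)) : Bool :=
  decide (pvRank a < pvRank b) || (!decide (pvRank b < pvRank a) && decide (pvSec a < pvSec b))

theorem pvSorted2_foldl (xs : List (List (String × String))) :
    PySem.List.sorted2 xs pvRank pvSec
      = xs.foldl (fun acc x => PySem.List.insertBy pvBefore x acc) [] := rfl

theorem pvSec_of_rank_lt (y : List (String × String)) (h : pvRank y ≠ 2) : pvSec y = [] := by
  simp [pvSec, h]

-- B's single stable sort equals: rank-0 bucket ++ rank-1 bucket ++ sorted rank-2 bucket
theorem pvSorted2_char (xs : List (List (String × String))) :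
    PySem.List.sorted2 xs pvRank pvSec
      = pvF 0 xs ++ pvF 1 xs ++ PySem.List.sorted (pvF 2 xs) (fun x => (pvKeyOf x).toList) := by
  induction xs using List.reverseRecOn with
  | nil => simp [pvSorted2_foldl, pvF, PySem.List.sorted]
  | append_singleton xs x ih =>
    have hF : ∀ i : Int, pvF i (xs ++ [x]) = pvF i xs ++ if pvRank x == i then [x] else [] := by
      intro i; simp [pvF, List.filter_append, List.filter_cons]
    rw [pvSorted2_foldl, List.foldl_append, ← pvSorted2_foldl, ih]
    rw [PySem.List.sorted_eq_foldl_insertBy (pvF 2 (xs ++ [x])), hF 2,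
      List.foldl_append, ← PySem.List.sorted_eq_foldl_insertBy]
    simp only [List.foldl_cons, List.foldl_nil]
    rcases pvRank_cases x with hr | hr | hr
    · -- rank 0: stays after the rank-0 bucket, before everything else
      rw [List.append_assoc,
        insertBy_append_of_not_before pvBefore x (pvF 0 xs) _ (by
          intro y hy
          have h0 := pvRank_mem_F hy
          simp [pvBefore, hr, h0, pvSec_of_rank_lt x (by omega), pvSec_of_rank_lt y (by omega)]),
        insertBy_front_of_before pvBefore x _ (by
          intro y hy
          rcases List.mem_append.mp hy with hy | hy
          · have h1 := pvRank_mem_F hy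
            simp [pvBefore, hr, h1]
          · have h2 := pvMem_sorted_F2 hy
            simp [pvBefore, hr, h2])]
      simp [hF, hr]
    · -- rank 1: after the rank-0 and rank-1 buckets, before the sorted rank-2 bucket
      rw [insertBy_append_of_not_before pvBefore x (pvF 0 xs ++ pvF 1 xs) _ (by
          intro y hy
          rcases List.mem_append.mp hy with hy | hy <;>
          · have h0 := pvRank_mem_F hy
            simp [pvBefore, hr, h0, pvSec_of_rank_lt x (by omega), pvSec_of_rank_lt y (by omega)]),
        insertBy_front_of_before pvBefore x _ (by
          intro y hy
          have h2 := pvMem_sorted_F2 hy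
          simp [pvBefore, hr, h2])]
      simp [hF, hr]
    · -- rank 2: skips the first two buckets, inserted into the sorted bucket by its key
      rw [insertBy_append_of_not_before pvBefore x (pvF 0 xs ++ pvF 1 xs) _ (by
          intro y hy
          rcases List.mem_append.mp hy with hy | hy <;>
          · have h0 := pvRank_mem_F hy
            simp [pvBefore, hr, h0, pvSec_of_rank_lt y (by omega)]),
        insertBy_congr pvBefore
          (fun a b => decide ((pvKeyOf a).toList < (pvKeyOf b).toList)) x _ (by
          intro y hy
          have h2 := pvMem_sorted_F2 hy
          simp [pvBefore, hr, h2, pvSec])]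
      simp [hF, hr]

-- ===== VERDICT (by name: the statement is the Claim_ definition above) =====
theorem sort_by_key_spec : Claim_equal_sort_by_key := by
  intro value_list _ _
  show sort_by_key value_list = sort_by_key_alt value_list
  rw [sort_by_key, sort_by_key_alt, pvSorted2_char, pvFoldA]
  simp
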